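-- pv_equiv track=rewrite | github.com/MtSomeThree/ILPLearning | NQueens.py | DFS
-- ===== SOURCE A (Python) =====
-- def DFS(N, now, columns, points, ans):
-- 	if now == N:
-- 		return ans + 1
-- 	for i in range(N):
-- 		if i in columns:
-- 			continue
-- 		flag = False
-- 		for x, y in points:
-- 			if abs(x - now) == abs(y - i):
-- 				flag = True
-- 				break
-- 		if flag:
-- 			continue
-- 		columns.add(i)
-- 		points.add((now, i))
-- 		ans = DFS(N, now + 1, columns, points, ans)
-- 		points.remove((now, i))
-- 		columns.remove(i)
-- 	return ans
-- ===== SOURCE B (Python) =====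
-- def DFS(N, now, columns, points, ans):
--     # Level-synchronous (breadth-first) counting: instead of depth-first recursion with
--     # backtracking, keep the list of all consistent partial boards for the current row
--     # and expand it one row at a time; the final count is the number of surviving boards.
--     # Does not mutate its arguments (A mutates and restores; return value is the same).
--     boards = [(frozenset(columns), frozenset(points))]
--     row = now
--     while row != N and boards:
--         nxt = []
--         for cols, pts in boards:
--             for i in range(N):
--                 if i not in cols and all(abs(x - row) != abs(y - i) for (x, y) in pts):
--                     nxt.append((cols | {i}, pts | {(row, i)}))
--         boards = nxt
--         row += 1
--     return ans + (len(boards) if row == N else 0)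
-- ===== Notes on version B (the rewrite author's own statement) =====
-- stated objective: alternative
-- what changed: B replaces A's depth-first backtracking (mutate the shared sets, recurse, restore, thread the accumulator through every call) by a level-synchronous breadth-first sweep: it keeps the list of all consistent partial boards for the current row, expands the whole level one row at a time, and returns ans plus the number of boards that survive to row N.
import Mathlib
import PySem

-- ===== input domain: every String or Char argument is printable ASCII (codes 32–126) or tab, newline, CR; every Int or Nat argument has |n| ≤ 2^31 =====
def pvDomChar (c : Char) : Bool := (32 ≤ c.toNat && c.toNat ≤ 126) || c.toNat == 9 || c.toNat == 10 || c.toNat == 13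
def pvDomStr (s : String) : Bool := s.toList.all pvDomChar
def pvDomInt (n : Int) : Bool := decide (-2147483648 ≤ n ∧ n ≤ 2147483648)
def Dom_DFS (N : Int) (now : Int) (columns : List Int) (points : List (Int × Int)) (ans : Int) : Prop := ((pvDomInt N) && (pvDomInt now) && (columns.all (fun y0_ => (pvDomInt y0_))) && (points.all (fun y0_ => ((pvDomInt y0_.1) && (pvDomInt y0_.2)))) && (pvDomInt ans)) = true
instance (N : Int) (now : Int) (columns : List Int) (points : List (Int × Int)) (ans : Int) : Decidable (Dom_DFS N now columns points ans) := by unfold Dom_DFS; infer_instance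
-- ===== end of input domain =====

-- B replaces A's depth-first backtracking (mutate / recurse / restore, accumulator threaded
-- through the recursion) by a level-synchronous breadth-first sweep: it keeps the list of all
-- consistent partial boards for the current row and expands it one row at a time; the count is
-- the number of surviving boards.  Return value only: A mutates and restores its set
-- arguments, B does not mutate them.  Objective: alternative decomposition.

-- Termination measure shared by both ports: number of columns 0..N-1 still free.
def pvFree (N : Int) (columns : List Int) : Nat :=
  ((List.range N.toNat).filter (fun j : Nat => ! PySem.Set.contains columns (j : Int))).length

theorem pvFilterLenLe (l : List Nat) (p q : Nat → Bool) (h : ∀ x, q x = true → p x = true) :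
    (l.filter q).length ≤ (l.filter p).length := by
  induction l with
  | nil => simp
  | cons a t ih =>
    simp only [List.filter_cons]
    by_cases hq : q a = true
    · rw [if_pos hq, if_pos (h a hq)]; simpa using ih
    · rw [if_neg hq]
      by_cases hp : p a = true
      · rw [if_pos hp]; exact Nat.le_succ_of_le ih
      · rw [if_neg hp]; exact ih

theorem pvFree_add_lt (N : Int) (columns : List Int) (i : Nat)
    (hiN : (i : Int) < N) (hc : PySem.Set.contains columns (i : Int) = false) :
    pvFree N (PySem.Set.add columns (i : Int)) < pvFree N columns := by
  have hnm : (i : Int) ∉ columns := by simpa [PySem.Set.contains] using hc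
  have hadd : PySem.Set.add columns (i : Int) = columns ++ [(i : Int)] := by
    simp [PySem.Set.add, hnm]
  unfold pvFree
  rw [hadd]
  have hmem : i ∈ List.range N.toNat := by rw [List.mem_range]; omega
  have hsub : ∀ j : Nat, (! PySem.Set.contains (columns ++ [(i : Int)]) (j : Int)) = true →
      (! PySem.Set.contains columns (j : Int)) = true := by
    intro j hj
    simp [PySem.Set.contains] at hj ⊢
    exact hj.1
  have hi1 : (! PySem.Set.contains columns ((i : Nat) : Int)) = true := by
    simpa [PySem.Set.contains] using hnm
  have hi2 : ¬ (! PySem.Set.contains (columns ++ [(i : Int)]) ((i : Nat) : Int)) = true := by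
    simp [PySem.Set.contains]
  have key : ∀ (l : List Nat), i ∈ l →
      (l.filter (fun j : Nat => ! PySem.Set.contains (columns ++ [(i : Int)]) (j : Int))).length
        < (l.filter (fun j : Nat => ! PySem.Set.contains columns (j : Int))).length := by
    intro l hl
    induction l with
    | nil => cases hl
    | cons a t ih =>
      have hlen := pvFilterLenLe t (fun j : Nat => ! PySem.Set.contains columns (j : Int))
        (fun j : Nat => ! PySem.Set.contains (columns ++ [(i : Int)]) (j : Int)) hsub
      rcases List.mem_cons.mp hl with rfl | hmt
      · simp only [List.filter_cons]
        rw [if_neg hi2, if_pos hi1]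
        simpa using Nat.lt_succ_of_le hlen
      · simp only [List.filter_cons]
        by_cases ha : (! PySem.Set.contains columns ((a : Nat) : Int)) = true
        · rw [if_pos ha]
          by_cases ha2 : (! PySem.Set.contains (columns ++ [(i : Int)]) ((a : Nat) : Int)) = true
          · rw [if_pos ha2]; simpa using Nat.succ_lt_succ (ih hmt)
          · rw [if_neg ha2]; exact Nat.lt_succ_of_lt (ih hmt)
        · rw [if_neg ha, if_neg (fun h => ha (hsub a h))]
          exact ih hmt
  exact key (List.range N.toNat) hmem

-- ===== PORT A =====
-- A mutates its set arguments but restores them before returning (the removed elements were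
-- absent before the adds — a point (now,i) already in `points` is caught by the diagonal
-- test), so the add/remove restore is ported by continuing the loop with the original sets.
mutual
def DFS (N : Int) (now : Int) (columns : List Int) (points : List (Int × Int)) (ans : Int) : Int :=
  if now = N then ans + 1
  else DFSloop N now 0 columns points ans
termination_by (pvFree N columns, N.toNat + 1)
decreasing_by exact Prod.Lex.right _ (by omega)

-- 'for i in range(N)' with continue / flag-break, threading ans through the recursion
def DFSloop (N : Int) (now : Int) (i : Nat) (columns : List Int) (points : List (Int × Int)) (ans : Int) : Int :=
  if h : (i : Int) < N then
    if hc : PySem.Set.contains columns (i : Int) then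
      DFSloop N now (i + 1) columns points ans
    else if points.any (fun xy => (xy.1 - now).natAbs == (xy.2 - (i : Int)).natAbs) then
      DFSloop N now (i + 1) columns points ans
    else
      let ans' := DFS N (now + 1) (PySem.Set.add columns (i : Int)) (PySem.Set.add points (now, (i : Int))) ans
      DFSloop N now (i + 1) columns points ans'
  else ans
termination_by (pvFree N columns, N.toNat - i)
decreasing_by
  all_goals first
    | exact Prod.Lex.left _ _ (pvFree_add_lt N columns i h (by simpa using hc))
    | exact Prod.Lex.right _ (by omega)
end

-- ===== PORT B =====
-- one BFS step: 'for cols, pts in boards: for i in range(N): if valid: nxt.append(extended)'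
def bfsExpand (N : Int) (row : Int) (boards : List (List Int × List (Int × Int))) :
    List (List Int × List (Int × Int)) :=
  boards.flatMap (fun b =>
    (PySem.List.pyRange 0 N 1).filterMap (fun i =>
      if ! PySem.Set.contains b.1 i
          && b.2.all (fun xy => ! ((xy.1 - row).natAbs == (xy.2 - i).natAbs)) then
        some (PySem.Set.union b.1 [i], PySem.Set.union b.2 [(row, i)])
      else none))

-- 'while row != N and boards:' — fuel is a totality guard only; the chosen initial fuel is
-- proved sufficient in the lemmas below (the Python loop always terminates)
def bfsLoop (N : Int) (fuel : Nat) (row : Int) (boards : List (List Int × List (Int × Int))) : Int :=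
  match fuel with
  | 0 => 0
  | fuel + 1 =>
    if row ≠ N ∧ boards ≠ [] then bfsLoop N fuel (row + 1) (bfsExpand N row boards)
    else if row = N then (boards.length : Int) else 0

def DFS_alt (N : Int) (now : Int) (columns : List Int) (points : List (Int × Int)) (ans : Int) : Int :=
  ans + bfsLoop N (pvFree N columns + (N - now).toNat + 1) now [(columns, points)]

-- ===== PRECONDITION & SPEC =====
def Spec_DFS (N : Int) (now : Int) (columns : List Int) (points : List (Int × Int)) (ans : Int) (out : Int) : Prop := out = DFS_alt N now columns points ans
instance (N : Int) (now : Int) (columns : List Int) (points : List (Int × Int)) (ans : Int) (out : Int) : Decidable (Spec_DFS N now columns points ans out) := by unfold Spec_DFS; infer_instance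

-- ===== CLAIM (what is proved, stated in full; the proofs are below) =====
def Claim_equal_DFS : Prop := ∀ (N : Int) (now : Int) (columns : List Int) (points : List (Int × Int)) (ans : Int), Dom_DFS N now columns points ans → Spec_DFS N now columns points ans (DFS N now columns points ans)

-- ===== LEMMAS AND PROOFS =====

-- the same fact as pvFree_add_lt for an Int column index (used for B's expansion step)
theorem pvFree_add_lt' (N : Int) (columns : List Int) (i : Int) (h0 : 0 ≤ i)
    (hiN : i < N) (hc : PySem.Set.contains columns i = false) :
    pvFree N (PySem.Set.add columns i) < pvFree N columns := by
  have hi : ((i.toNat : Nat) : Int) = i := by omega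
  have := pvFree_add_lt N columns i.toNat (by rw [hi]; exact hiN) (by rw [hi]; exact hc)
  rwa [hi] at this

-- the placement test and the extension of one board by a queen in column i (proof-side name
-- for the body shared by A's loop branches and B's inner loops)
def pvSel (now : Int) (c : List Int) (p : List (Int × Int)) (i : Int) :
    Option (List Int × List (Int × Int)) :=
  if ! PySem.Set.contains c i
      && p.all (fun xy => ! ((xy.1 - now).natAbs == (xy.2 - i).natAbs)) then
    some (PySem.Set.add c i, PySem.Set.add p (now, i))
  else none

-- the children of one partial board at row `row`
def pvChildren (N : Int) (row : Int) (b : List Int × List (Int × Int)) :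
    List (List Int × List (Int × Int)) :=
  (PySem.List.pyRange 0 N 1).filterMap (pvSel row b.1 b.2)

theorem bfsExpand_eq (N row : Int) (boards : List (List Int × List (Int × Int))) :
    bfsExpand N row boards = boards.flatMap (pvChildren N row) := rfl

-- characterization of A: DFS shifts its accumulator and, off the base case, equals the sum of
-- the independent counts of the children of (columns, points)
theorem A_char : ∀ (m : Nat) (N now : Int) (columns : List Int) (points : List (Int × Int)),
    pvFree N columns ≤ m → ∀ ans : Int,
    DFS N now columns points ans
      = ans + (if now = N then 1
          else ((pvChildren N now (columns, points)).map
                  (fun b => DFS N (now + 1) b.1 b.2 0)).sum) := by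
  intro m
  induction m using Nat.strong_induction_on with
  | _ m IH =>
    intro N now c p hf
    have hshift : ∀ (N' now' : Int) (c' : List Int) (p' : List (Int × Int)),
        pvFree N' c' < m → ∀ ans : Int,
        DFS N' now' c' p' ans = ans + DFS N' now' c' p' 0 := by
      intro N' now' c' p' hlt ans
      rw [IH _ hlt N' now' c' p' (le_refl _) ans, IH _ hlt N' now' c' p' (le_refl _) 0]
      ring
    have hloop : ∀ (j i : Nat), N.toNat - i ≤ j → ∀ ans : Int,
        DFSloop N now i c p ans
          = ans + (((PySem.List.pyRange (i : Int) N 1).filterMap (pvSel now c p)).map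
              (fun b => DFS N (now + 1) b.1 b.2 0)).sum := by
      intro j
      induction j with
      | zero =>
        intro i hij ans
        have hiN : ¬ ((i : Int) < N) := by omega
        rw [DFSloop, dif_neg hiN, PySem.List.pyRange_one_eq_nil (by omega)]
        simp
      | succ j ihj =>
        intro i hij ans
        by_cases hiN : (i : Int) < N
        · rw [DFSloop, dif_pos hiN, PySem.List.pyRange_one_cons hiN]
          have hcast : (i : Int) + 1 = ((i + 1 : Nat) : Int) := by push_cast; ring
          by_cases hc : PySem.Set.contains c (i : Int)
          · rw [dif_pos hc]
            have hsel : pvSel now c p (i : Int) = none := by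
              unfold pvSel; rw [hc]; rfl
            rw [List.filterMap_cons, hsel, hcast, ihj (i + 1) (by omega) ans]
          · rw [dif_neg hc]
            by_cases hd : p.any (fun xy => (xy.1 - now).natAbs == (xy.2 - (i : Int)).natAbs)
            · rw [if_pos hd]
              have hsel : pvSel now c p (i : Int) = none := by
                have hall : p.all (fun xy => ! ((xy.1 - now).natAbs == (xy.2 - (i : Int)).natAbs)) = false := by
                  simp_all
                unfold pvSel; rw [hall, Bool.and_false]; rfl
              rw [List.filterMap_cons, hsel, hcast, ihj (i + 1) (by omega) ans]
            · rw [if_neg hd]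
              have hall : p.all (fun xy => ! ((xy.1 - now).natAbs == (xy.2 - (i : Int)).natAbs)) = true := by
                simp_all
              have hsel : pvSel now c p (i : Int)
                  = some (PySem.Set.add c (i : Int), PySem.Set.add p (now, (i : Int))) := by
                have hcb : PySem.Set.contains c (i : Int) = false := eq_false_of_ne_true hc
                unfold pvSel; rw [hcb, hall]; rfl
              have hlt : pvFree N (PySem.Set.add c (i : Int)) < m :=
                lt_of_lt_of_le (pvFree_add_lt N c i hiN (by simpa using hc)) hf
              rw [List.filterMap_cons, hsel, hcast, ihj (i + 1) (by omega) _,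
                hshift N (now + 1) _ _ hlt ans]
              simp only [List.map_cons, List.sum_cons]
              ring
        · rw [DFSloop, dif_neg hiN, PySem.List.pyRange_one_eq_nil (by omega)]
          simp
    intro ans
    rw [DFS]
    by_cases hnN : now = N
    · rw [if_pos hnN, if_pos hnN]
    · rw [if_neg hnN, if_neg hnN, hloop N.toNat 0 (by omega) ans]
      rfl

-- the BFS loop, given enough fuel, computes the sum of the per-board DFS counts
theorem B_char : ∀ (fuel : Nat) (N row : Int) (boards : List (List Int × List (Int × Int))),
    ((row ≤ N ∧ (N - row).toNat < fuel) ∨ (∀ b ∈ boards, pvFree N b.1 < fuel)) →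
    bfsLoop N fuel row boards = (boards.map (fun b => DFS N row b.1 b.2 0)).sum := by
  intro fuel
  induction fuel with
  | zero =>
    intro N row boards H
    have hnil : boards = [] := by
      rcases H with ⟨_, h⟩ | h
      · omega
      · cases boards with
        | nil => rfl
        | cons b t => exact absurd (h b (List.mem_cons_self)) (by omega)
    subst hnil
    simp [bfsLoop]
  | succ fuel ih =>
    intro N row boards H
    by_cases hcont : row ≠ N ∧ boards ≠ []
    · rw [bfsLoop, if_pos hcont]
      have H' : ((row + 1 ≤ N ∧ (N - (row + 1)).toNat < fuel) ∨
          (∀ b ∈ bfsExpand N row boards, pvFree N b.1 < fuel)) := by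
        rcases H with ⟨hle, hlt⟩ | h
        · exact Or.inl ⟨by omega, by omega⟩
        · refine Or.inr ?_
          intro b' hb'
          rw [bfsExpand_eq] at hb'
          obtain ⟨b, hb, hbc⟩ := List.mem_flatMap.mp hb'
          obtain ⟨i, hi, hsel⟩ := List.mem_filterMap.mp hbc
          obtain ⟨h0, hiN⟩ := PySem.List.mem_pyRange_one.mp hi
          unfold pvSel at hsel
          by_cases hok : (! PySem.Set.contains b.1 i
              && b.2.all (fun xy => ! ((xy.1 - row).natAbs == (xy.2 - i).natAbs))) = true
          · rw [if_pos hok] at hsel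
            have hc : PySem.Set.contains b.1 i = false := by
              rcases Bool.and_eq_true_iff.mp hok with ⟨h1, _⟩
              simpa using h1
            have hlt := pvFree_add_lt' N b.1 i h0 hiN hc
            have : b'.1 = PySem.Set.add b.1 i := by
              rw [← Option.some_inj.mp hsel]
            rw [this]
            have := h b hb
            omega
          · rw [if_neg hok] at hsel
            exact absurd hsel (by simp)
      rw [ih N (row + 1) _ H', bfsExpand_eq, List.map_flatMap, List.flatMap_def,
        List.sum_flatten, List.map_map]
      have hone : ∀ b ∈ boards,
          (List.sum ∘ fun a => (pvChildren N row a).map (fun b => DFS N (row + 1) b.1 b.2 0)) b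
            = DFS N row b.1 b.2 0 := by
        intro b _
        obtain ⟨c, p⟩ := b
        show ((pvChildren N row (c, p)).map (fun b => DFS N (row + 1) b.1 b.2 0)).sum = _
        rw [A_char (pvFree N c) N row c p (le_refl _) 0, if_neg hcont.1]
        ring
      rw [List.map_congr_left hone]
    · rw [bfsLoop, if_neg hcont]
      rcases not_and_or.mp hcont with hrow | hbd
      · have hrow : row = N := by simpa using hrow
        rw [if_pos hrow]
        have hone : ∀ b ∈ boards, DFS N row b.1 b.2 0 = 1 := by
          intro b _
          rw [DFS, if_pos hrow]
          omega
        rw [List.map_congr_left hone]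
        simp
      · have hbd : boards = [] := by simpa using hbd
        subst hbd
        by_cases hrow : row = N <;> simp [hrow]

-- ===== VERDICT (by name: the statement is the Claim_ definition above) =====
theorem DFS_spec : Claim_equal_DFS := by
  intro N now columns points ans _
  unfold Spec_DFS DFS_alt
  have hcond : (now ≤ N ∧ (N - now).toNat < pvFree N columns + (N - now).toNat + 1) ∨
      (∀ b ∈ [(columns, points)], pvFree N b.1 < pvFree N columns + (N - now).toNat + 1) := by
    by_cases h : now ≤ N
    · exact Or.inl ⟨h, by omega⟩
    · refine Or.inr ?_
      rintro b hb
      simp only [List.mem_singleton] at hb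
      subst hb
      show pvFree N columns < _
      omega
  have hB := B_char (pvFree N columns + (N - now).toNat + 1) N now [(columns, points)] hcond
  have hA := A_char (pvFree N columns) N now columns points (le_refl _) ans
  have hA0 := A_char (pvFree N columns) N now columns points (le_refl _) 0
  rw [hB]
  simp only [List.map_cons, List.map_nil, List.sum_cons, List.sum_nil, add_zero]
  rw [hA, hA0]
  ring
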